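-- pv_equiv track=rewrite | github.com/Ryanl2000/PythonSubject | DSAAadvance/MonotonicStack.py | CumsumStack
-- ===== SOURCE A (Python) =====
-- def MonotonicStack(n):  # 仅能用于处理不包含重复值(下面的#中的处理重复值方法待验证)
--     stack = []
--     res = {}
--     i = 0
--     while stack or i < len(n):
--         if not stack:
--             stack.append(i)
--             res[i] = [-1]
--             i += 1
--             continue
--         if i == len(n):
--             while stack:
--                 temp = stack.pop()
--                 res[temp].append(-1)
--             break
--         temp = stack.pop()
--         if n[i] < n[temp]:
--             res[temp].append(i)
--             continue
--         elif n[i] > n[temp]: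
--             stack.append(temp)
--             stack.append(i)
--             res[i] = [temp]
--         # else:  # 重复值
--         #     stack.append(temp)
--         #     stack.append(i)
--         #     res[i] = [res[temp][0]]
--         i += 1
--     return res
--
-- def CumsumStack(n):  #对于n中每一个数字，返回包含本身，且本身为最小值的字数组累加和
--     res = []
--     for key, value in MonotonicStack(n).items():
--         left, right = value[0] + 1, value[1] - 1
--         if value[1] == -1:
--             right = len(n) - 1
--         sum = 0
--         for i in range(left, right + 1):
--             sum += n[i]
--         res.append((key,sum * n[key]))
--     return res
-- ===== SOURCE B (Python) =====
-- # Direct per-index boundary scans + prefix sums: no monotonic stack, no dict; O(1) range sums.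
-- def CumsumStack(n):
--     m = len(n)
--     prefix = [0]
--     for x in n:
--         prefix.append(prefix[-1] + x)
--     res = []
--     for i in range(m):
--         left = i - 1
--         while left >= 0 and n[left] >= n[i]:
--             left -= 1
--         right = i + 1
--         while right < m and n[right] >= n[i]:
--             right += 1
--         res.append((i, (prefix[right] - prefix[left + 1]) * n[i]))
--     return res
-- ===== Notes on version B (the rewrite author's own statement) =====
-- stated objective: alternative
-- what changed: Replaces A's monotonic-stack-plus-dict construction and its inner element-by-element range-summing loop by direct per-index scans for the nearest strictly-smaller neighbours together with a precomputed prefix-sum array giving each range sum in O(1).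
import Mathlib
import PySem

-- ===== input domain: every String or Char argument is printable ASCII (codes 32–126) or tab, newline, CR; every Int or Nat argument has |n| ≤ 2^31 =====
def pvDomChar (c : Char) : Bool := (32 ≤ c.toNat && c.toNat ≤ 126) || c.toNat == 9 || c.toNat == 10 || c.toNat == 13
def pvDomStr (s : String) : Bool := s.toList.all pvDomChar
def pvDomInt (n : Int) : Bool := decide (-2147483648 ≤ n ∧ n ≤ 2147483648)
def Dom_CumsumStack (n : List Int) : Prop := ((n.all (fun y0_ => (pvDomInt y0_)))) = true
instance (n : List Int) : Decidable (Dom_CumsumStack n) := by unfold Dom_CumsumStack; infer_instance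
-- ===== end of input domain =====

-- One line: B replaces A's monotonic stack + dict + inner summing loop by per-index nearest-smaller
-- scans and a prefix-sum array (alternative algorithm, identical return value on Pre_).

-- ===== PORT A =====
-- The Python stack (append/pop at the right end) is represented top-first (cons/head).
-- The while-loop guard `while stack or i < len(n)` and the leading `if not stack` are merged into
-- the match below: for an empty stack the loop runs iff i < len(n) and then pushes; indices read
-- by n[...] are always in range when reached, rendered with pyGetD _ _ 0.
-- i : Nat (Python's i starts at 0 and only increases; it never exceeds len(n) — the `len(n) ≤ i`
-- test is Python's `i == len(n)`, written with ≤ to make termination manifest).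
def pvA_msLoop (n : List Int) (stack : List Int) (res : PySem.Dict Int (List Int)) (i : Nat) :
    PySem.Dict Int (List Int) :=
  match stack with
  | [] =>
    if i < n.length then
      pvA_msLoop n [(i : Int)] (res.insert (i : Int) [-1]) (i + 1)
    else res
  | temp :: stack' =>
    if n.length ≤ i then
      -- while stack: temp = stack.pop(); res[temp].append(-1)
      (temp :: stack').foldl (fun r t => r.modify t [] (· ++ [-1])) res
    else if PySem.List.pyGetD n (i : Int) 0 < PySem.List.pyGetD n temp 0 then
      pvA_msLoop n stack' (res.modify temp [] (· ++ [(i : Int)])) i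
    else if PySem.List.pyGetD n temp 0 < PySem.List.pyGetD n (i : Int) 0 then
      pvA_msLoop n ((i : Int) :: temp :: stack') (res.insert (i : Int) [temp]) (i + 1)
    else
      pvA_msLoop n stack' res (i + 1)
termination_by 2 * (n.length - i) + stack.length
decreasing_by all_goals (simp_all; try omega)

def MonotonicStack (n : List Int) : PySem.Dict Int (List Int) :=
  pvA_msLoop n [] PySem.Dict.empty 0

def CumsumStack (n : List Int) : List (Int × Int) :=
  (MonotonicStack n).items.foldl
    (fun res kv =>
      let key := kv.1
      let value := kv.2
      let left := PySem.List.pyGetD value 0 0 + 1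
      let right := if PySem.List.pyGetD value 1 0 = -1 then (n.length : Int) - 1
                   else PySem.List.pyGetD value 1 0 - 1
      let sum := (PySem.List.pyRange left (right + 1) 1).foldl
                   (fun acc j => acc + PySem.List.pyGetD n j 0) 0
      res ++ [(key, sum * PySem.List.pyGetD n key 0)]) []

-- ===== PORT B =====
def pvB_prefix (n : List Int) : List Int :=
  n.foldl (fun p x => p ++ [PySem.List.pyGetD p (-1) 0 + x]) [0]

-- while left >= 0 and n[left] >= n[i]: left -= 1
def pvB_goLeft (n : List Int) (x : Int) (l : Int) : Int :=
  if 0 ≤ l ∧ x ≤ PySem.List.pyGetD n l 0 then pvB_goLeft n x (l - 1) else l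
termination_by (l + 1).toNat
decreasing_by omega

-- while right < m and n[right] >= n[i]: right += 1
def pvB_goRight (n : List Int) (x : Int) (r : Int) : Int :=
  if r < PySem.List.len n ∧ x ≤ PySem.List.pyGetD n r 0 then pvB_goRight n x (r + 1) else r
termination_by (PySem.List.len n - r).toNat
decreasing_by simp only [PySem.List.len_eq] at *; omega

def CumsumStack_alt (n : List Int) : List (Int × Int) :=
  let pre := pvB_prefix n
  (List.range n.length).foldl
    (fun res i =>
      let x := PySem.List.pyGetD n (i : Int) 0
      let left := pvB_goLeft n x ((i : Int) - 1)
      let right := pvB_goRight n x ((i : Int) + 1)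
      res ++ [((i : Int), (PySem.List.pyGetD pre right 0 - PySem.List.pyGetD pre (left + 1) 0) * x)])
    []

-- ===== PRECONDITION & SPEC =====
-- Pre_ excludes exactly the inputs on which A raises (IndexError/KeyError in the second pass):
-- lists containing two equal values with only strictly greater values between them — A's stack
-- drops such an index, leaving its record incomplete.
def Pre_CumsumStack (n : List Int) : Prop :=
  ∀ j < n.length, ∀ i < j, n.getD i 0 = n.getD j 0 →
    ∃ k < j, i < k ∧ n.getD k 0 ≤ n.getD i 0

instance (n : List Int) : Decidable (Pre_CumsumStack n) := by
  unfold Pre_CumsumStack; infer_instance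

def pvWitness_CumsumStack : List Int := [1, 0, 1]

def Spec_CumsumStack (n : List Int) (out : List (Int × Int)) : Prop := out = CumsumStack_alt n
instance (n : List Int) (out : List (Int × Int)) : Decidable (Spec_CumsumStack n out) := by
  unfold Spec_CumsumStack; infer_instance

-- ===== CLAIM (what is proved, stated in full; the proofs are below) =====
def Claim_equal_CumsumStack : Prop :=
  ∀ (n : List Int), Dom_CumsumStack n → Pre_CumsumStack n → Spec_CumsumStack n (CumsumStack n)

-- ===== LEMMAS AND PROOFS =====

-- n[t] for a Nat index (the only way both programs read the list).
def pvNv (n : List Int) (t : Nat) : Int := n.getD t 0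

-- B's boundaries, reused as the *names* of A's recorded values in the proofs.
def pvLval (n : List Int) (t : Nat) : Int := pvB_goLeft n (pvNv n t) ((t : Int) - 1)
def pvRval (n : List Int) (t : Nat) : Int := pvB_goRight n (pvNv n t) ((t : Int) + 1)
-- A's right marker: -1 when no strictly smaller element follows.
def pvRA (n : List Int) (t : Nat) : Int :=
  if pvRval n t = (n.length : Int) then -1 else pvRval n t

def pvEntry (n : List Int) (st : List Nat) (t : Nat) : List Int :=
  if t ∈ st then [pvLval n t] else [pvLval n t, pvRA n t]

def pvMkRes (n : List Int) (i : Nat) (st : List Nat) : PySem.Dict Int (List Int) :=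
  PySem.Dict.mk ((List.range i).map (fun t : Nat => ((t : Int), pvEntry n st t)))

-- The monotonic-stack invariant: indices strictly decreasing top-first, values strictly
-- decreasing top-first, and between a stack element and the element above it (resp. the cursor)
-- every value is strictly greater.
def pvStInv (n : List Int) (i : Nat) : List Nat → Prop
  | [] => True
  | [a] => a < i ∧ (∀ u, a < u → u < i → pvNv n a < pvNv n u)
  | a :: b :: rest => a < i ∧ (∀ u, a < u → u < i → pvNv n a < pvNv n u) ∧
      b < a ∧ pvNv n b < pvNv n a ∧ pvStInv n a (b :: rest)

-- Every index below the cursor and off the stack already has a first strictly-smaller successor.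
def pvPopped (n : List Int) (i : Nat) (st : List Nat) : Prop :=
  ∀ t, t < i → t ∉ st →
    ∃ r, t < r ∧ r ≤ i ∧ r < n.length ∧ pvNv n r < pvNv n t ∧
      ∀ v, t < v → v < r → pvNv n t ≤ pvNv n v

def pvInv (n : List Int) (i : Nat) (st : List Nat) (res : PySem.Dict Int (List Int)) : Prop :=
  i ≤ n.length ∧ res = pvMkRes n i st ∧ pvStInv n i st ∧ pvPopped n i st


-- n[u] for a Nat-cast index is pvNv.
theorem pvPyGetD_coe (n : List Int) (u : Nat) :
    PySem.List.pyGetD n ((u : Nat) : Int) 0 = pvNv n u := by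
  simp [PySem.List.pyGetD_natCast, pvNv]

-- ---- B's left scan ----
theorem pvGoLeft_eq_neg_one (n : List Int) (x : Int) :
    ∀ k (l : Int), (l + 1).toNat ≤ k → -1 ≤ l →
      (∀ u : Nat, (u : Int) ≤ l → x ≤ pvNv n u) → pvB_goLeft n x l = -1 := by
  intro k
  induction k with
  | zero =>
    intro l hk hl _
    have : l = -1 := by omega
    subst this
    rw [pvB_goLeft]; norm_num
  | succ k ih =>
    intro l hk hl hall
    rw [pvB_goLeft]
    split_ifs with h
    · exact ih (l - 1) (by omega) (by omega) (fun u hu => hall u (by omega))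
    · by_contra hne
      have h0 : 0 ≤ l := by omega
      refine h ⟨h0, ?_⟩
      rw [show l = ((l.toNat : Nat) : Int) by omega, pvPyGetD_coe]
      exact hall l.toNat (by omega)

theorem pvGoLeft_eq_coe (n : List Int) (x : Int) (u : Nat) :
    ∀ k (l : Int), (l + 1).toNat ≤ k → (u : Int) ≤ l → pvNv n u < x →
      (∀ v : Nat, u < v → (v : Int) ≤ l → x ≤ pvNv n v) → pvB_goLeft n x l = u := by
  intro k
  induction k with
  | zero => intro l hk hl _ _; omega
  | succ k ih =>
    intro l hk hl hu hall
    rw [pvB_goLeft]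
    split_ifs with h
    · have hne : l ≠ (u : Int) := by
        intro he
        rw [he, pvPyGetD_coe] at h
        omega
      exact ih (l - 1) (by omega) (by omega) hu (fun v hv hvl => hall v hv (by omega))
    · by_contra hne
      have h0 : 0 ≤ l := by omega
      refine h ⟨h0, ?_⟩
      rw [show l = ((l.toNat : Nat) : Int) by omega, pvPyGetD_coe]
      exact hall l.toNat (by omega) (by omega)

theorem pvGoLeft_bounds (n : List Int) (x : Int) :
    ∀ k (l : Int), (l + 1).toNat ≤ k → -1 ≤ l →
      -1 ≤ pvB_goLeft n x l ∧ pvB_goLeft n x l ≤ l := by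
  intro k
  induction k with
  | zero =>
    intro l hk hl
    have : l = -1 := by omega
    subst this
    rw [pvB_goLeft]; norm_num
  | succ k ih =>
    intro l hk hl
    rw [pvB_goLeft]
    split_ifs with h
    · have := ih (l - 1) (by omega) (by omega)
      omega
    · omega

-- ---- B's right scan ----
theorem pvGoRight_eq_len (n : List Int) (x : Int) :
    ∀ k (r : Int), ((n.length : Int) - r).toNat ≤ k → 0 ≤ r → r ≤ (n.length : Int) →
      (∀ u : Nat, r ≤ (u : Int) → u < n.length → x ≤ pvNv n u) →
      pvB_goRight n x r = (n.length : Int) := by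
  intro k
  induction k with
  | zero =>
    intro r hk _ hr _
    have : r = (n.length : Int) := by omega
    subst this
    rw [pvB_goRight]
    simp [PySem.List.len_eq]
  | succ k ih =>
    intro r hk h0 hr hall
    rw [pvB_goRight]
    split_ifs with h
    · have hlt : r < (n.length : Int) := by
        simpa [PySem.List.len_eq] using h.1
      exact ih (r + 1) (by omega) (by omega) (by omega) (fun u hu => hall u (by omega))
    · by_contra hne
      have hlt : r < (n.length : Int) := by omega
      refine h ⟨by simpa [PySem.List.len_eq] using hlt, ?_⟩
      rw [show r = ((r.toNat : Nat) : Int) by omega, pvPyGetD_coe]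
      exact hall r.toNat (by omega) (by omega)

theorem pvGoRight_eq_coe (n : List Int) (x : Int) (u : Nat) :
    ∀ k (r : Int), ((n.length : Int) - r).toNat ≤ k → 0 ≤ r → r ≤ (u : Int) → u < n.length →
      pvNv n u < x → (∀ v : Nat, r ≤ (v : Int) → v < u → x ≤ pvNv n v) →
      pvB_goRight n x r = u := by
  intro k
  induction k with
  | zero => intro r hk _ hr hu _ _; omega
  | succ k ih =>
    intro r hk h0 hr hu hx hall
    rw [pvB_goRight]
    split_ifs with h
    · have hne : r ≠ (u : Int) := by
        intro he
        rw [he, pvPyGetD_coe] at h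
        omega
      exact ih (r + 1) (by omega) (by omega) (by omega) hu hx
        (fun v hv hvl => hall v (by omega) hvl)
    · by_contra hne
      have hlt : r < (u : Int) := by omega
      refine h ⟨by simp [PySem.List.len_eq]; omega, ?_⟩
      rw [show r = ((r.toNat : Nat) : Int) by omega, pvPyGetD_coe]
      exact hall r.toNat (by omega) (by omega)

theorem pvGoRight_bounds (n : List Int) (x : Int) :
    ∀ k (r : Int), ((n.length : Int) - r).toNat ≤ k → 0 ≤ r → r ≤ (n.length : Int) →
      r ≤ pvB_goRight n x r ∧ pvB_goRight n x r ≤ (n.length : Int) := by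
  intro k
  induction k with
  | zero =>
    intro r hk _ hr
    have : r = (n.length : Int) := by omega
    subst this
    rw [pvB_goRight]
    simp [PySem.List.len_eq]
  | succ k ih =>
    intro r hk h0 hr
    rw [pvB_goRight]
    split_ifs with h
    · have hlt : r < (n.length : Int) := by simpa [PySem.List.len_eq] using h.1
      have := ih (r + 1) (by omega) (by omega) (by omega)
      omega
    · omega

-- ---- B's prefix sums ----
def pvPsums (s : Int) : List Int → List Int
  | [] => []
  | x :: xs => (s + x) :: pvPsums (s + x) xs

theorem pvPsums_getD : ∀ (l : List Int) (s : Int) (j : Nat), j < l.length →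
    (pvPsums s l).getD j 0 = s + (l.take (j + 1)).sum := by
  intro l
  induction l with
  | nil => intro s j hj; simp at hj
  | cons x xs ih =>
    intro s j hj
    cases j with
    | zero => simp [pvPsums]
    | succ j' =>
      have := ih (s + x) j' (by simpa using hj)
      simp only [pvPsums, List.getD_cons_succ, List.take_succ_cons, List.sum_cons, this]
      ring

theorem pvPrefix_fold : ∀ (l acc : List Int) (s : Int),
    PySem.List.pyGetD acc (-1) 0 = s →
    l.foldl (fun p x => p ++ [PySem.List.pyGetD p (-1) 0 + x]) acc = acc ++ pvPsums s l := by
  intro l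
  induction l with
  | nil => intro acc s _; simp [pvPsums]
  | cons x xs ih =>
    intro acc s hs
    simp only [List.foldl_cons, hs]
    rw [ih (acc ++ [s + x]) (s + x) (PySem.List.pyGetD_neg_one_append_singleton acc (s + x) 0)]
    simp [pvPsums]

theorem pvPrefix_eq (n : List Int) : pvB_prefix n = 0 :: pvPsums 0 n := by
  unfold pvB_prefix
  rw [pvPrefix_fold n [0] 0 (by rfl)]
  rfl

theorem pvPreGetD (n : List Int) (j : Nat) (hj : j ≤ n.length) :
    PySem.List.pyGetD (pvB_prefix n) ((j : Nat) : Int) 0 = (n.take j).sum := by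
  rw [pvPrefix_eq, PySem.List.pyGetD_natCast]
  cases j with
  | zero => simp
  | succ j' =>
    have hlt : j' < n.length := by omega
    simp only [List.getD_cons_succ]
    rw [pvPsums_getD n 0 j' hlt]
    ring

-- ---- A's inner summation loop ----
theorem pvRangeMap (n : List Int) : ∀ (d a : Nat), a + d ≤ n.length →
    (PySem.List.pyRange (a : Int) ((a : Int) + (d : Int)) 1).map
      (fun j => PySem.List.pyGetD n j 0) = (n.drop a).take d := by
  intro d
  induction d with
  | zero =>
    intro a _
    simp [PySem.List.pyRange]
  | succ d ih =>
    intro a ha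
    have hlt : (a : Int) < (a : Int) + ((d : Int) + 1) := by omega
    rw [show ((a : Int) + ((d : Nat) + 1 : Nat)) = ((a : Int) + ((d : Int) + 1)) by push_cast; ring,
      PySem.List.pyRange_one_cons hlt]
    have halen : a < n.length := by omega
    have hstep : ((a : Int) + 1) = ((a + 1 : Nat) : Int) := by push_cast; ring
    have harg : ((a : Int) + ((d : Int) + 1)) = (((a + 1 : Nat) : Int) + ((d : Nat) : Int)) := by
      push_cast; ring
    rw [List.map_cons, pvPyGetD_coe, harg, hstep, ih (a + 1) (by omega)]
    rw [List.drop_eq_getElem_cons halen, List.take_succ_cons]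
    have hval : pvNv n a = n[a] := by
      simp [pvNv, List.getD_eq_getElem?_getD, List.getElem?_eq_getElem halen]
    rw [hval]

theorem pvSumRange (n : List Int) (a b : Nat) (hab : a ≤ b) (hb : b ≤ n.length) :
    (PySem.List.pyRange (a : Int) (b : Int) 1).foldl
      (fun acc j => acc + PySem.List.pyGetD n j 0) 0 =
      (n.take b).sum - (n.take a).sum := by
  rw [PySem.List.foldl_add]
  rw [show ((b : Nat) : Int) = ((a : Int) + ((b - a : Nat) : Int)) by omega]
  rw [pvRangeMap n (b - a) a (by omega)]
  have : n.take b = n.take a ++ (n.drop a).take (b - a) := by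
    rw [← List.take_add]
    congr 1
    omega
  rw [this, List.sum_append]
  ring


-- ---- stack-invariant lemmas ----
theorem pvStInv_head (n : List Int) (i : Nat) (a : Nat) (st' : List Nat)
    (h : pvStInv n i (a :: st')) :
    a < i ∧ (∀ u, a < u → u < i → pvNv n a < pvNv n u) := by
  cases st' with
  | nil => exact h
  | cons b rest => exact ⟨h.1, h.2.1⟩

theorem pvStInv_pop (n : List Int) (i : Nat) (a : Nat) (st' : List Nat)
    (h : pvStInv n i (a :: st')) : pvStInv n i st' := by
  cases st' with
  | nil => trivial
  | cons b rest =>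
    obtain ⟨ha, hseg, hba, hvba, h'⟩ := h
    obtain ⟨hb, hsegb⟩ := pvStInv_head n a b rest h'
    have hsegb' : ∀ u, b < u → u < i → pvNv n b < pvNv n u := by
      intro u hbu hui
      rcases lt_trichotomy u a with hua | hua | hua
      · exact hsegb u hbu hua
      · subst hua; exact hvba
      · exact lt_trans hvba (hseg u hua hui)
    cases rest with
    | nil => exact ⟨lt_trans hb ha, hsegb'⟩
    | cons c rest' =>
      obtain ⟨_, _, hcb, hvcb, h''⟩ := h'
      exact ⟨lt_trans hb ha, hsegb', hcb, hvcb, h''⟩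

theorem pvStInv_tail_lt (n : List Int) :
    ∀ (st' : List Nat) (i a : Nat), pvStInv n i (a :: st') → ∀ t ∈ st', t < a := by
  intro st'
  induction st' with
  | nil => intro i a _ t ht; simp at ht
  | cons b rest ih =>
    intro i a h t ht
    obtain ⟨_, _, hba, _, h'⟩ := h
    rcases List.mem_cons.mp ht with rfl | ht'
    · exact hba
    · exact lt_trans (ih a b h' t ht') hba

-- ---- the region containing no strictly-smaller element ----
theorem pvRegionMin (n : List Int) (i : Nat) (lo : Int)
    (hpop : ∀ u : Nat, lo < (u : Int) → u < i →
      ∃ r, u < r ∧ r ≤ i ∧ r < n.length ∧ pvNv n r < pvNv n u) :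
    ∀ u : Nat, lo < (u : Int) → u < i → pvNv n i ≤ pvNv n u := by
  have main : ∀ d (u : Nat), i - u ≤ d → lo < (u : Int) → u < i → pvNv n i ≤ pvNv n u := by
    intro d
    induction d with
    | zero => intro u hd _ hui; omega
    | succ d ih =>
      intro u hd hlo hui
      by_contra hlt
      push Not at hlt
      obtain ⟨r, hur, hri, _, hvr⟩ := hpop u hlo hui
      rcases eq_or_lt_of_le hri with rfl | hri'
      · omega
      · have := ih r (by omega) (by omega) hri'
        omega
  exact fun u => main (i - u) u le_rfl

-- ---- res-dictionary bookkeeping ----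
theorem pvFind?_map_of_mem (g : Nat → List Int) (t : Nat) :
    ∀ (l : List Nat), t ∈ l →
      (l.map (fun s : Nat => ((s : Int), g s))).find? (fun p => p.1 == (t : Int)) =
        some ((t : Int), g t) := by
  intro l
  induction l with
  | nil => intro ht; simp at ht
  | cons s l' ih =>
    intro ht
    by_cases hst : s = t
    · subst hst; simp
    · have hne : ((s : Int) == (t : Int)) = false := by
        simp; omega
      rcases List.mem_cons.mp ht with rfl | ht'
      · omega
      · simp only [List.map_cons, List.find?, hne]
        exact ih ht'

theorem pvContains_coe (n : List Int) (i : Nat) (st : List Nat) (t : Nat) (ht : t < i) :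
    (pvMkRes n i st).contains ((t : Nat) : Int) = true := by
  simp only [pvMkRes, PySem.Dict.contains_mk, List.any_map, List.any_eq_true]
  exact ⟨t, List.mem_range.mpr ht, by simp⟩

theorem pvContains_top (n : List Int) (i : Nat) (st : List Nat) :
    (pvMkRes n i st).contains ((i : Nat) : Int) = false := by
  simp only [pvMkRes, PySem.Dict.contains_mk, List.any_map, List.any_eq_false]
  intro t ht
  have h := List.mem_range.mp ht
  simp only [Function.comp, beq_iff_eq, Int.natCast_inj]
  omega

theorem pvGetD_mkRes (n : List Int) (i : Nat) (st : List Nat) (t : Nat) (ht : t < i) :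
    (pvMkRes n i st).getD ((t : Nat) : Int) [] = pvEntry n st t := by
  simp only [pvMkRes, PySem.Dict.getD, PySem.Dict.get?]
  rw [pvFind?_map_of_mem (fun s => pvEntry n st s) t (List.range i) (List.mem_range.mpr ht)]
  rfl

theorem pvInsert_fresh (n : List Int) (i : Nat) (st st' : List Nat) (v : List Int)
    (hv : v = pvEntry n st' i) (hcong : ∀ t, t < i → pvEntry n st' t = pvEntry n st t) :
    (pvMkRes n i st).insert ((i : Nat) : Int) v = pvMkRes n (i + 1) st' := by
  apply PySem.Dict.ext
  rw [PySem.Dict.items_insert_of_not_contains _ _ (pvContains_top n i st)]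
  simp only [pvMkRes, List.range_succ, List.map_append, List.map_cons, List.map_nil]
  congr 1
  · apply List.map_congr_left
    intro t ht
    rw [hcong t (List.mem_range.mp ht)]
  · rw [hv]

theorem pvModify_eq (n : List Int) (i : Nat) (st st' : List Nat) (a : Nat) (ha : a < i)
    (f : List Int → List Int) (hval : f (pvEntry n st a) = pvEntry n st' a)
    (hcong : ∀ t, t < i → t ≠ a → pvEntry n st' t = pvEntry n st t) :
    (pvMkRes n i st).modify ((a : Nat) : Int) [] f = pvMkRes n i st' := by
  unfold PySem.Dict.modify
  rw [pvGetD_mkRes n i st a ha, hval]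
  apply PySem.Dict.ext
  rw [PySem.Dict.items_insert_of_contains _ _ (pvContains_coe n i st a ha)]
  simp only [pvMkRes, List.map_map]
  apply List.map_congr_left
  intro t ht
  have ht' := List.mem_range.mp ht
  by_cases hta : t = a
  · subst hta
    simp
  · have hne : ((t : Int) == (a : Int)) = false := by
      simp; omega
    simp only [Function.comp, hne]
    rw [hcong t ht' hta]
    simp


theorem pvEntry_congr_cons (n : List Int) (a : Nat) (st : List Nat) (t : Nat) (hta : t ≠ a) :
    pvEntry n st t = pvEntry n (a :: st) t := by
  simp [pvEntry, List.mem_cons, hta]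

-- unfolding equations of A's loop
theorem pvA_msLoop_nil (n : List Int) (res : PySem.Dict Int (List Int)) (i : Nat) :
    pvA_msLoop n [] res i =
      if i < n.length then pvA_msLoop n [(i : Int)] (res.insert (i : Int) [-1]) (i + 1)
      else res := by
  rw [pvA_msLoop]

theorem pvA_msLoop_cons (n : List Int) (temp : Int) (stack' : List Int)
    (res : PySem.Dict Int (List Int)) (i : Nat) :
    pvA_msLoop n (temp :: stack') res i =
      if n.length ≤ i then
        (temp :: stack').foldl (fun r t => r.modify t [] (· ++ [-1])) res
      else if PySem.List.pyGetD n (i : Int) 0 < PySem.List.pyGetD n temp 0 then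
        pvA_msLoop n stack' (res.modify temp [] (· ++ [(i : Int)])) i
      else if PySem.List.pyGetD n temp 0 < PySem.List.pyGetD n (i : Int) 0 then
        pvA_msLoop n ((i : Int) :: temp :: stack') (res.insert (i : Int) [temp]) (i + 1)
      else
        pvA_msLoop n stack' res (i + 1) := by
  rw [pvA_msLoop]

-- the final pop-everything loop
theorem pvCleanup (n : List Int) :
    ∀ (st : List Nat) (res : PySem.Dict Int (List Int)), pvStInv n n.length st →
      res = pvMkRes n n.length st →
      (st.map (fun t : Nat => (t : Int))).foldl (fun r t => r.modify t [] (· ++ [-1])) res =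
        pvMkRes n n.length [] := by
  intro st
  induction st with
  | nil => intro res _ hres; simpa using hres
  | cons a st' ih =>
    intro res hst hres
    obtain ⟨ha, hseg⟩ := pvStInv_head n n.length a st' hst
    have hrv : pvRval n a = ((n.length : Nat) : Int) := by
      refine pvGoRight_eq_len n (pvNv n a) (((n.length : Int) - ((a : Int) + 1)).toNat)
        ((a : Int) + 1) le_rfl (by omega) (by omega) ?_
      intro u hu hul
      exact le_of_lt (hseg u (by omega) hul)
    have hanotst' : a ∉ st' := fun hmem =>
      absurd (pvStInv_tail_lt n st' n.length a hst a hmem) (lt_irrefl a)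
    have hstep : res.modify ((a : Nat) : Int) [] (· ++ [-1]) = pvMkRes n n.length st' := by
      rw [hres]
      refine pvModify_eq n n.length (a :: st') st' a ha _ ?_ ?_
      · simp [pvEntry, hanotst', pvRA, hrv]
      · intro t _ hta
        exact pvEntry_congr_cons n a st' t hta
    simp only [List.map_cons, List.foldl_cons, hstep]
    exact ih _ (pvStInv_pop n n.length a st' hst) rfl

theorem pvA_msLoop_eq (n : List Int) (hPre : Pre_CumsumStack n) :
    ∀ k i st res, pvInv n i st res → 2 * (n.length - i) + st.length ≤ k →
      pvA_msLoop n (st.map (fun t : Nat => (t : Int))) res i = pvMkRes n n.length [] := by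
  intro k
  induction k with
  | zero =>
    intro i st res hInv hk
    obtain ⟨hi, hres, hst, hpop⟩ := hInv
    have hst0 : st = [] := List.length_eq_zero_iff.mp (by omega)
    subst hst0
    have hieq : i = n.length := by omega
    subst hieq
    simp only [List.map_nil, pvA_msLoop_nil, lt_irrefl, if_false]
    simpa using hres
  | succ k ih =>
    intro i st res hInv hk
    obtain ⟨hi, hres, hst, hpop⟩ := hInv
    cases st with
    | nil =>
      simp only [List.map_nil, pvA_msLoop_nil]
      by_cases hlen : i < n.length
      · rw [if_pos hlen]
        have hreg : ∀ u : Nat, u < i → pvNv n i ≤ pvNv n u := by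
          have h' : ∀ u : Nat, (-1 : Int) < (u : Int) → u < i →
              ∃ r, u < r ∧ r ≤ i ∧ r < n.length ∧ pvNv n r < pvNv n u := by
            intro u _ hui
            obtain ⟨r, h1, h2, h3, h4, _⟩ := hpop u hui (by simp)
            exact ⟨r, h1, h2, h3, h4⟩
          intro u hu
          exact pvRegionMin n i (-1) h' u (by omega) hu
        have hlv : pvLval n i = -1 := by
          refine pvGoLeft_eq_neg_one n (pvNv n i) (((i : Int) - 1 + 1).toNat) ((i : Int) - 1)
            le_rfl (by omega) ?_
          intro u hu
          exact hreg u (by omega)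
        have hres' : res.insert ((i : Nat) : Int) [-1] = pvMkRes n (i + 1) [i] := by
          rw [hres]
          refine pvInsert_fresh n i [] [i] [-1] ?_ ?_
          · simp [pvEntry, hlv]
          · intro t ht
            have : t ≠ i := by omega
            simp [pvEntry, this]
        rw [hres']
        have hmap : [((i : Nat) : Int)] = ([i] : List Nat).map (fun t : Nat => (t : Int)) := by simp
        rw [hmap]
        refine ih (i + 1) [i] _ ⟨by omega, rfl, ?_, ?_⟩ (by simp at hk ⊢; omega)
        · exact ⟨by omega, fun u h1 h2 => absurd h1 (by omega)⟩
        · intro t ht htm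
          have ht' : t < i := by
            simp only [List.mem_singleton] at htm
            omega
          obtain ⟨r, h1, h2, h3, h4, h5⟩ := hpop t ht' (by simp)
          exact ⟨r, h1, by omega, h3, h4, h5⟩
      · rw [if_neg hlen]
        have hieq : i = n.length := by omega
        subst hieq
        simpa using hres
    | cons a st' =>
      simp only [List.map_cons]
      rw [pvA_msLoop_cons]
      obtain ⟨hai, hseg⟩ := pvStInv_head n i a st' hst
      by_cases hlen : n.length ≤ i
      · rw [if_pos hlen]
        have hieq : i = n.length := by omega
        subst hieq
        have := pvCleanup n (a :: st') res hst hres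
        simpa using this
      · rw [if_neg hlen]
        have hlen' : i < n.length := by omega
        rw [pvPyGetD_coe n i, pvPyGetD_coe n a]
        have hanotst' : a ∉ st' := fun hmem =>
          absurd (pvStInv_tail_lt n st' i a hst a hmem) (lt_irrefl a)
        by_cases hlt : pvNv n i < pvNv n a
        · rw [if_pos hlt]
          have hrv : pvRval n a = ((i : Nat) : Int) := by
            refine pvGoRight_eq_coe n (pvNv n a) i (((n.length : Int) - ((a : Int) + 1)).toNat)
              ((a : Int) + 1) le_rfl (by omega) (by omega) hlen' hlt ?_
            intro v hv hvi
            exact le_of_lt (hseg v (by omega) hvi)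
          have hres' : res.modify ((a : Nat) : Int) [] (· ++ [((i : Nat) : Int)]) =
              pvMkRes n i st' := by
            rw [hres]
            refine pvModify_eq n i (a :: st') st' a hai _ ?_ ?_
            · have hne : ((i : Nat) : Int) ≠ ((n.length : Nat) : Int) := by
                simp only [ne_eq, Int.natCast_inj]
                omega
              simp [pvEntry, hanotst', pvRA, hrv, hne]
            · intro t _ hta
              exact pvEntry_congr_cons n a st' t hta
          rw [hres']
          refine ih i st' _ ⟨by omega, rfl, pvStInv_pop n i a st' hst, ?_⟩
            (by simp at hk ⊢; omega)
          intro t ht htm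
          by_cases hta : t = a
          · subst hta
            refine ⟨i, hai, le_rfl, hlen', hlt, ?_⟩
            intro v h1 h2
            exact le_of_lt (hseg v h1 h2)
          · exact hpop t ht (by simp [List.mem_cons, hta, htm])
        · rw [if_neg hlt]
          by_cases hgt : pvNv n a < pvNv n i
          · rw [if_pos hgt]
            have hreg : ∀ u : Nat, a < u → u < i → pvNv n i ≤ pvNv n u := by
              have h' : ∀ u : Nat, ((a : Nat) : Int) < (u : Int) → u < i →
                  ∃ r, u < r ∧ r ≤ i ∧ r < n.length ∧ pvNv n r < pvNv n u := by
                intro u hu hui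
                have hau : a < u := by omega
                have hnm : u ∉ a :: st' := by
                  intro hmem
                  rcases List.mem_cons.mp hmem with rfl | hmem'
                  · omega
                  · exact absurd (pvStInv_tail_lt n st' i a hst u hmem') (by omega)
                obtain ⟨r, h1, h2, h3, h4, _⟩ := hpop u hui hnm
                exact ⟨r, h1, h2, h3, h4⟩
              intro u hau hui
              exact pvRegionMin n i ((a : Nat) : Int) h' u (by omega) hui
            have hlv : pvLval n i = ((a : Nat) : Int) := by
              refine pvGoLeft_eq_coe n (pvNv n i) a (((i : Int) - 1 + 1).toNat) ((i : Int) - 1)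
                le_rfl (by omega) hgt ?_
              intro v hav hvl
              exact hreg v hav (by omega)
            have hres' : res.insert ((i : Nat) : Int) [((a : Nat) : Int)] =
                pvMkRes n (i + 1) (i :: a :: st') := by
              rw [hres]
              refine pvInsert_fresh n i (a :: st') (i :: a :: st') _ ?_ ?_
              · simp [pvEntry, hlv]
              · intro t ht
                exact (pvEntry_congr_cons n i (a :: st') t (by omega)).symm
            rw [hres']
            have hmap : ((i : Nat) : Int) :: ((a : Nat) : Int) ::
                st'.map (fun t : Nat => (t : Int)) =
                ((i :: a :: st') : List Nat).map (fun t : Nat => (t : Int)) := by simp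
            rw [hmap]
            refine ih (i + 1) (i :: a :: st') _ ⟨by omega, rfl, ?_, ?_⟩
              (by simp at hk ⊢; omega)
            · exact ⟨by omega, fun u h1 h2 => absurd h1 (by omega), hai, hgt, hst⟩
            · intro t ht htm
              have hti : t ≠ i := by
                intro he; exact htm (he ▸ List.mem_cons_self)
              obtain ⟨r, h1, h2, h3, h4, h5⟩ := hpop t (by omega)
                (fun hmem => htm (List.mem_cons_of_mem i hmem))
              exact ⟨r, h1, by omega, h3, h4, h5⟩
          · rw [if_neg hgt]
            exfalso
            have heq : n.getD a 0 = n.getD i 0 := by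
              have : pvNv n a = pvNv n i := by omega
              exact this
            obtain ⟨kk, hkj, hik, hkle⟩ := hPre i hlen' a hai heq
            have := hseg kk hik hkj
            have h1 : pvNv n kk ≤ pvNv n a := hkle
            simp only [pvNv] at *
            omega


theorem pvGetD_pair_one (x y : Int) : PySem.List.pyGetD [x, y] 1 0 = y := by
  norm_num [PySem.List.pyGetD, PySem.List.pyGet?, PySem.List.pyIdx?]

theorem CumsumStack_eq_alt (n : List Int) (hPre : Pre_CumsumStack n) :
    CumsumStack n = CumsumStack_alt n := by
  have hms : MonotonicStack n = pvMkRes n n.length [] := by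
    unfold MonotonicStack
    have hmap : ([] : List Int) = ([] : List Nat).map (fun t : Nat => (t : Int)) := rfl
    rw [hmap]
    refine pvA_msLoop_eq n hPre (2 * n.length) 0 [] _
      ⟨Nat.zero_le _, ?_, trivial, fun t ht _ => absurd ht (Nat.not_lt_zero t)⟩ (by simp)
    apply PySem.Dict.ext
    simp [PySem.Dict.empty, pvMkRes]
  unfold CumsumStack CumsumStack_alt
  rw [hms]
  have hitems : (pvMkRes n n.length []).items =
      (List.range n.length).map (fun t : Nat => ((t : Int), [pvLval n t, pvRA n t])) := by
    simp [pvMkRes, pvEntry]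
  rw [hitems]
  rw [PySem.List.foldl_append_singleton_eq_map, PySem.List.foldl_append_singleton_eq_map]
  have hfm : ∀ (l : List Nat), List.flatMap (fun a : Nat => [(a : Int)]) l =
      l.map (fun a : Nat => (a : Int)) := by
    intro l
    induction l with
    | nil => rfl
    | cons x xs ih => simp [ih]
  simp only [List.nil_append, List.bind_eq_flatMap, List.pure_def, hfm, List.map_map]
  apply List.map_congr_left
  intro t htm
  have ht : t < n.length := List.mem_range.mp htm
  have hb1 : -1 ≤ pvLval n t ∧ pvLval n t ≤ (t : Int) - 1 :=
    pvGoLeft_bounds n (pvNv n t) (((t : Int) - 1 + 1).toNat) ((t : Int) - 1) le_rfl (by omega)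
  have hb2 : (t : Int) + 1 ≤ pvRval n t ∧ pvRval n t ≤ (n.length : Int) :=
    pvGoRight_bounds n (pvNv n t) (((n.length : Int) - ((t : Int) + 1)).toNat) ((t : Int) + 1)
      le_rfl (by omega) (by omega)
  simp only [Function.comp_apply, PySem.List.pyGetD_zero_cons, pvGetD_pair_one, pvPyGetD_coe]
  have hright : (if pvRA n t = -1 then (n.length : Int) - 1 else pvRA n t - 1) + 1 =
      pvRval n t := by
    unfold pvRA
    split_ifs <;> omega
  have hL : pvB_goLeft n (pvNv n t) ((t : Int) - 1) = pvLval n t := rfl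
  have hR : pvB_goRight n (pvNv n t) ((t : Int) + 1) = pvRval n t := rfl
  rw [hL, hR, hright]
  obtain ⟨a, ha⟩ : ∃ a : Nat, pvLval n t + 1 = ((a : Nat) : Int) :=
    ⟨(pvLval n t + 1).toNat, by omega⟩
  obtain ⟨b, hb⟩ : ∃ b : Nat, pvRval n t = ((b : Nat) : Int) :=
    ⟨(pvRval n t).toNat, by omega⟩
  rw [ha, hb]
  rw [pvSumRange n a b (by omega) (by omega)]
  rw [pvPreGetD n b (by omega), pvPreGetD n a (by omega)]

-- ===== VERDICT (by name: the statement is the Claim_ definition above) =====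
theorem CumsumStack_spec : Claim_equal_CumsumStack := by
  intro n _ hPre
  unfold Spec_CumsumStack
  exact CumsumStack_eq_alt n hPre
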